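-- pv_equiv track=rewrite | github.com/SuleymanEmirGergin/DotsHub | backend/app/runtime.py | _build_canonical_to_en_symptoms
-- ===== SOURCE A (Python) =====
-- from typing import Any, Dict, List, Optional, Set
--
-- def _build_canonical_to_en_symptoms(
--     en_to_tr: Dict[str, Optional[str]],
-- ) -> Dict[str, List[str]]:
--     """Build reverse lookup: canonical -> sorted EN symptoms."""
--     grouped: Dict[str, Set[str]] = {}
--     for en, tr in en_to_tr.items():
--         if not isinstance(tr, str):
--             continue
--         canonical = tr.strip().lower()
--         if not canonical:
--             continue
--         en_clean = str(en).strip().lower()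
--         if not en_clean:
--             continue
--         grouped.setdefault(canonical, set()).add(en_clean)
--     return {
--         canonical: sorted(en_list)
--         for canonical, en_list in grouped.items()
--     }
-- ===== SOURCE B (Python) =====
-- from typing import Dict, List, Optional
--
--
-- def _build_canonical_to_en_symptoms(
--     en_to_tr: Dict[str, Optional[str]],
-- ) -> Dict[str, List[str]]:
--     """Build reverse lookup: canonical -> sorted EN symptoms.
--
--     Single pass: each group's list is kept sorted and duplicate-free at all
--     times by an ordered insertion, so no sets and no final per-group sort.
--     """
--     result: Dict[str, List[str]] = {}
--     for en, tr in en_to_tr.items():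
--         if not isinstance(tr, str):
--             continue
--         canonical = tr.strip().lower()
--         en_clean = str(en).strip().lower()
--         if canonical != "" and en_clean != "":
--             lst = result.setdefault(canonical, [])
--             i = 0
--             while i < len(lst) and lst[i] < en_clean:
--                 i += 1
--             if i == len(lst) or lst[i] != en_clean:
--                 lst.insert(i, en_clean)
--     return result
-- ===== Notes on version B (the rewrite author's own statement) =====
-- stated objective: alternative
-- what changed: B replaces A's group-into-sets-then-sort-each-group shape by a single pass that keeps each group's list sorted and duplicate-free via ordered insertion, so no sets and no final per-group sort.
import Mathlib
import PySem

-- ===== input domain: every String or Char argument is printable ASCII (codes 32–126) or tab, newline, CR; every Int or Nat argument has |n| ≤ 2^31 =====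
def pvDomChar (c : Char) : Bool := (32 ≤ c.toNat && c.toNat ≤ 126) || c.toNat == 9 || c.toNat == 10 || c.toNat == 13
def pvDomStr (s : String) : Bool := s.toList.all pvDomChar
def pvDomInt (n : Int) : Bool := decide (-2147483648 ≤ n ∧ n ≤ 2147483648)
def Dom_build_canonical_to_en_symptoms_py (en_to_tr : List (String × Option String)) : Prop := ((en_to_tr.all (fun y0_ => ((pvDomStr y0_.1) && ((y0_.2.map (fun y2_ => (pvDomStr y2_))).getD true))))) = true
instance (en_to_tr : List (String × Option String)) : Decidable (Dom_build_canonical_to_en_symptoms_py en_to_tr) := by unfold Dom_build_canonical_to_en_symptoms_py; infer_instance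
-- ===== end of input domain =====

-- B builds each group's sorted duplicate-free list incrementally by ordered insertion (one pass, no sets,
-- no final per-group sort); same return value as A, proved equal. (A mutates nothing observable.)

-- ===== PORT A =====
-- Python's `grouped.setdefault(canonical, set()).add(en_clean)` updates the set stored at `canonical`
-- (inserting the key at the end if absent): exactly `Dict.modify canonical Set.empty (Set.add · en_clean)`.
def pyStepA (grouped : PySem.Dict String (PySem.Set String)) (p : String × Option String) :
    PySem.Dict String (PySem.Set String) :=
  match p.2 with
  | none => grouped        -- `if not isinstance(tr, str): continue`
  | some tr =>
    let canonical := PySem.Str.lower (PySem.Str.strip tr)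
    if canonical = "" then grouped
    else
      let en_clean := PySem.Str.lower (PySem.Str.strip p.1)
      if en_clean = "" then grouped
      else grouped.modify canonical PySem.Set.empty (fun s => PySem.Set.add s en_clean)

def build_canonical_to_en_symptoms_py (en_to_tr : List (String × Option String)) : List (String × List String) :=
  let grouped := en_to_tr.foldl pyStepA PySem.Dict.empty
  grouped.items.map (fun q => (q.1, PySem.List.sorted q.2 (fun x => x) false))

-- ===== PORT B =====
-- structural-recursion form of Source B's scan-and-insert: walk past elements < x, drop x if found, else insert.
def insertUniqueSorted (x : String) : List String → List String
  | [] => [x]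
  | y :: ys =>
    if y < x then y :: insertUniqueSorted x ys
    else if y = x then y :: ys
    else x :: y :: ys

def pyStepB (result : PySem.Dict String (List String)) (p : String × Option String) :
    PySem.Dict String (List String) :=
  match p.2 with
  | none => result
  | some tr =>
    let canonical := PySem.Str.lower (PySem.Str.strip tr)
    let en_clean := PySem.Str.lower (PySem.Str.strip p.1)
    if canonical ≠ "" ∧ en_clean ≠ "" then
      result.modify canonical [] (insertUniqueSorted en_clean)
    else result

def build_canonical_to_en_symptoms_py_alt (en_to_tr : List (String × Option String)) : List (String × List String) :=
  (en_to_tr.foldl pyStepB PySem.Dict.empty).items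

-- ===== PRECONDITION & SPEC =====
def Spec_build_canonical_to_en_symptoms_py (en_to_tr : List (String × Option String)) (out : List (String × List String)) : Prop := out = build_canonical_to_en_symptoms_py_alt en_to_tr
instance (en_to_tr : List (String × Option String)) (out : List (String × List String)) : Decidable (Spec_build_canonical_to_en_symptoms_py en_to_tr out) := by unfold Spec_build_canonical_to_en_symptoms_py; infer_instance

-- ===== CLAIM (what is proved, stated in full; the proofs are below) =====
def Claim_equal_build_canonical_to_en_symptoms_py : Prop := ∀ (en_to_tr : List (String × Option String)), Dom_build_canonical_to_en_symptoms_py en_to_tr → Spec_build_canonical_to_en_symptoms_py en_to_tr (build_canonical_to_en_symptoms_py en_to_tr)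

-- ===== LEMMAS AND PROOFS =====

-- the simulation map: B's stored list is the sorted form of A's stored set
def pvF (p : String × PySem.Set String) : String × List String :=
  (p.1, PySem.List.sorted p.2 (fun x => x) false)

-- ordered insertion into an already (≤-)sorted list containing x leaves it unchanged
theorem insertUniqueSorted_of_mem (x : String) (l : List String)
    (hs : l.Pairwise (· ≤ ·)) (hx : x ∈ l) : insertUniqueSorted x l = l := by
  induction l with
  | nil => cases hx
  | cons y ys ih =>
    rw [List.pairwise_cons] at hs
    by_cases h : y < x
    · have hxy : x ∈ ys := by
        rcases List.mem_cons.mp hx with rfl | h'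
        · exact absurd h (lt_irrefl x)
        · exact h'
      simp [insertUniqueSorted, h, ih hs.2 hxy]
    · rcases List.mem_cons.mp hx with rfl | h'
      · simp [insertUniqueSorted]
      · have : y ≤ x := hs.1 x h'
        have : y = x := le_antisymm this (not_lt.mp h)
        simp [insertUniqueSorted, this]

-- when x is absent, ordered insertion is exactly PySem's insertBy step of insertion sort
theorem insertUniqueSorted_of_not_mem (x : String) (l : List String) (hx : x ∉ l) :
    insertUniqueSorted x l = PySem.List.insertBy (fun a b => decide (a < b)) x l := by
  induction l with
  | nil => simp [insertUniqueSorted, PySem.List.insertBy]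
  | cons y ys ih =>
    have hxy : x ≠ y := fun h => hx (h ▸ List.mem_cons_self)
    have hx' : x ∉ ys := fun h => hx (List.mem_cons_of_mem _ h)
    by_cases h : y < x
    · have : ¬ x < y := fun h' => absurd (lt_trans h h') (lt_irrefl y)
      simp [insertUniqueSorted, PySem.List.insertBy, h, this, ih hx']
    · have hlt : x < y := lt_of_le_of_ne (not_lt.mp h) hxy
      simp [insertUniqueSorted, PySem.List.insertBy, h, hlt, Ne.symm hxy]

-- key lemma: ordered insertion simulates set-add-then-sort
theorem insertUniqueSorted_sorted (x : String) (s : PySem.Set String) :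
    insertUniqueSorted x (PySem.List.sorted s (fun a => a) false)
      = PySem.List.sorted (PySem.Set.add s x) (fun a => a) false := by
  by_cases hx : x ∈ s
  · rw [PySem.Set.add_of_mem hx]
    exact insertUniqueSorted_of_mem x _ (PySem.List.sorted_pairwise s (fun a => a)) ((PySem.List.mem_sorted _ _ _ _).mpr hx)
  · rw [PySem.Set.add_of_not_mem hx]
    have hx' : x ∉ PySem.List.sorted s (fun a : String => a) false := fun h => hx ((PySem.List.mem_sorted _ _ _ _).mp h)
    rw [insertUniqueSorted_of_not_mem x _ hx']
    rw [PySem.List.sorted_eq_foldl_insertBy, PySem.List.sorted_eq_foldl_insertBy]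
    simp [List.foldl_append]

-- lookups through the simulation map
theorem get?_map_pvF (l : List (String × PySem.Set String)) (k : String) :
    (PySem.Dict.mk (l.map pvF)).get? k
      = ((PySem.Dict.mk l).get? k).map (fun s => PySem.List.sorted s (fun a => a) false) := by
  induction l with
  | nil => rfl
  | cons p rest ih =>
    obtain ⟨a, s⟩ := p
    simp only [List.map_cons, pvF, PySem.Dict.get?_mk_cons]
    by_cases h : a == k
    · simp [h]
    · simp [h, ih]

theorem stepB_simulates (gA : PySem.Dict String (PySem.Set String)) (gB : PySem.Dict String (List String))
    (h : gB.items = gA.items.map pvF) (p : String × Option String) :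
    (pyStepB gB p).items = (pyStepA gA p).items.map pvF := by
  obtain ⟨itemsA⟩ := gA
  obtain ⟨itemsB⟩ := gB
  simp only at h
  subst h
  match p with
  | (en, none) => simp [pyStepA, pyStepB]
  | (en, some tr) =>
    simp only [pyStepA, pyStepB]
    by_cases hc : PySem.Str.lower (PySem.Str.strip tr) = ""
    · simp [hc]
    · by_cases he : PySem.Str.lower (PySem.Str.strip en) = ""
      · simp [hc, he]
      · simp only [hc, he, Ne, not_false_iff, and_self, if_true, if_false]
        set k := PySem.Str.lower (PySem.Str.strip tr) with hk
        set e := PySem.Str.lower (PySem.Str.strip en) with he'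
        -- both sides are `insert k …`; relate via items_insert
        have hget := get?_map_pvF itemsA k
        have hcontains : (PySem.Dict.mk (itemsA.map pvF)).contains k = (PySem.Dict.mk itemsA).contains k := by
          rw [PySem.Dict.contains_eq_isSome_get?, PySem.Dict.contains_eq_isSome_get?, hget]
          cases (PySem.Dict.mk itemsA).get? k <;> rfl
        have hgetD : (PySem.Dict.mk (itemsA.map pvF)).getD k []
            = PySem.List.sorted ((PySem.Dict.mk itemsA).getD k ([] : PySem.Set String)) (fun a => a) false := by
          rw [PySem.Dict.getD_eq_get?_getD, PySem.Dict.getD_eq_get?_getD, hget]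
          cases (PySem.Dict.mk itemsA).get? k <;> rfl
        simp only [PySem.Dict.modify, PySem.Dict.items_insert, hcontains]
        by_cases hmem : (PySem.Dict.mk itemsA).contains k
        · simp only [hmem, if_true, List.map_map]
          apply List.map_congr_left
          intro q hq
          by_cases hq1 : q.1 = k
          · simp [pvF, hq1, hgetD, insertUniqueSorted_sorted]
          · simp [pvF, hq1]
        · simp only [hmem, if_false, Bool.false_eq_true, List.map_append]
          simp [pvF, hgetD, insertUniqueSorted_sorted]

theorem foldl_simulates (l : List (String × Option String))
    (gA : PySem.Dict String (PySem.Set String)) (gB : PySem.Dict String (List String))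
    (h : gB.items = gA.items.map pvF) :
    (l.foldl pyStepB gB).items = (l.foldl pyStepA gA).items.map pvF := by
  induction l generalizing gA gB with
  | nil => simpa using h
  | cons p rest ih => exact ih _ _ (stepB_simulates gA gB h p)

-- ===== VERDICT (by name: the statement is the Claim_ definition above) =====
theorem build_canonical_to_en_symptoms_py_spec : Claim_equal_build_canonical_to_en_symptoms_py := by
  intro en_to_tr _
  unfold Spec_build_canonical_to_en_symptoms_py
  unfold build_canonical_to_en_symptoms_py build_canonical_to_en_symptoms_py_alt
  exact (foldl_simulates en_to_tr PySem.Dict.empty PySem.Dict.empty rfl).symm
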